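-- pv_equiv track=rewrite | github.com/doctfrezze/PorousAirfoil_PotentialFlow | Hydraulic_GEOMETRY.py | filter_circulaire
-- ===== SOURCE A (Python) =====
-- def filter_circulaire(liste, A,numPan):
--     """
--     Retourne tous les éléments connectés à A via des pas de +1 ou -1 circulaires dans la liste.
--     """
--     liste_set = set(liste)
--     visited = set()
--     à_visiter = [A]
--
--     min_val = 0
--     max_val = numPan-1
--
--     while à_visiter:
--         courant = à_visiter.pop()
--         if courant in liste_set and courant not in visited:
--             visited.add(courant)
--
--             voisin_plus = courant + 1 if courant < max_val else min_val
--             voisin_moins = courant - 1 if courant > min_val else max_val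
--
--             if voisin_plus in liste_set:
--                 à_visiter.append(voisin_plus)
--             if voisin_moins in liste_set:
--                 à_visiter.append(voisin_moins)
--
--     return sorted(list(visited), key=liste.index)
-- ===== SOURCE B (Python) =====
-- def filter_circulaire(liste, A, numPan):
--     """
--     Retourne tous les éléments connectés à A via des pas de +1 ou -1 circulaires dans la liste.
--     Bounded round-based fixpoint iteration instead of an explicit DFS stack.
--     """
--     S = set(liste)
--     mx = numPan - 1
--     comp = {A} & S
--     for _ in range(len(S)):
--         nxt = set(comp)
--         for x in comp:
--             for v in (x + 1 if x < mx else 0, x - 1 if x > 0 else mx):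
--                 if v in S:
--                     nxt.add(v)
--         comp = nxt
--     return sorted(comp, key=liste.index)
-- ===== Notes on version B (the rewrite author's own statement) =====
-- stated objective: alternative
-- what changed: Replaces the explicit-stack DFS flood fill with a round-based fixpoint iteration: starting from {A} intersected with the element set, the component is saturated by repeatedly adding the circular +1/-1 neighbours of every member, for len(set(liste)) rounds (enough to reach the fixpoint), then sorted by first index as before.
import Mathlib
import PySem

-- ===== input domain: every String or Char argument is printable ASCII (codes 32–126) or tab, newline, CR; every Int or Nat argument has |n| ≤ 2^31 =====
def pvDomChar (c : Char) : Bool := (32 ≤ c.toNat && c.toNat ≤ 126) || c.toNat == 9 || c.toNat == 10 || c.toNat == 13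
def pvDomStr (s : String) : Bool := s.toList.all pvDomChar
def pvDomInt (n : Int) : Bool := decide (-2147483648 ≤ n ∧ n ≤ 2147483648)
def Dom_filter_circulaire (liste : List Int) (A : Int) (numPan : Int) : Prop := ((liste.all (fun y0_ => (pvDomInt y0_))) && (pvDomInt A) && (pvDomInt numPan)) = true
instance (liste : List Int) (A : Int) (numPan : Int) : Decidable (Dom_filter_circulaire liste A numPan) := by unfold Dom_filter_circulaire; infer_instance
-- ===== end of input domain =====

-- B replaces A's explicit-stack DFS flood fill by a round-based fixpoint saturation of the
-- circular ±1 neighbour relation (alternative algorithm, same return value on every input).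

-- ===== PORT A =====
-- voisin_plus / voisin_moins, the circular neighbour formulas (shared by both ports, as in both Pythons)
def fcVoisinPlus (mx c : Int) : Int := if c < mx then c + 1 else 0
def fcVoisinMoins (mx c : Int) : Int := if c > 0 then c - 1 else mx

-- A's while-loop; the stack 'à_visiter' is held top-first (Python appends voisin_plus then
-- voisin_moins and pops from the end, so voisin_moins is popped first: here it is consed last).
def fcLoop (S : PySem.Set Int) (mx : Int) (stack : List Int) (visited : PySem.Set Int) : PySem.Set Int :=
  match stack with
  | [] => visited
  | c :: rest =>
    if h : (PySem.Set.contains S c && !(PySem.Set.contains visited c)) = true then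
      fcLoop S mx
        ((if PySem.Set.contains S (fcVoisinMoins mx c) then [fcVoisinMoins mx c] else []) ++
         (if PySem.Set.contains S (fcVoisinPlus mx c) then [fcVoisinPlus mx c] else []) ++ rest)
        (PySem.Set.add visited c)
    else fcLoop S mx rest visited
termination_by 2 * (S.toFinset \ visited.toFinset).card + stack.length
decreasing_by
  · simp only [Bool.and_eq_true, Bool.not_eq_true', PySem.Set.contains_eq_listContains,
      List.contains_eq_mem, decide_eq_true_eq, decide_eq_false_iff_not] at h
    have hadd : PySem.Set.add visited c = visited ++ [c] := PySem.Set.add_of_not_mem h.2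
    have htf : (PySem.Set.add visited c).toFinset = insert c visited.toFinset := by
      rw [hadd]; simp [List.toFinset_append]
    have hmem : c ∈ S.toFinset \ visited.toFinset := by
      simp [Finset.mem_sdiff, List.mem_toFinset, h.1, h.2]
    have hcard : (S.toFinset \ (PySem.Set.add visited c).toFinset).card
        = (S.toFinset \ visited.toFinset).card - 1 := by
      rw [htf, Finset.sdiff_insert, Finset.card_erase_of_mem hmem]
    have hpos : 1 ≤ (S.toFinset \ visited.toFinset).card := Finset.card_pos.2 ⟨c, hmem⟩ 
    simp only [hcard]
    split_ifs <;> (simp only [List.length_append, List.length_cons, List.length_nil]; omega)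
  · simp only [List.length_cons]; omega

-- the port of 'sorted(list(visited), key=liste.index)': liste.index is total here because every
-- visited element is a member of liste (proved below); the key is injective on visited, so the
-- sorted output does not depend on the set's iteration order.
-- A's while-loop over 'à_visiter'/visited and the final 'sorted(list(visited), key=liste.index)'.
-- liste.index is total here because every visited element is a member of liste (proved below);
-- the key is injective on visited, so the sorted output does not depend on set iteration order.
def filter_circulaire (liste : List Int) (A : Int) (numPan : Int) : List Int :=
  let liste_set := PySem.Set.ofList liste
  let visited := fcLoop liste_set (numPan - 1) [A] PySem.Set.empty
  PySem.List.sorted visited (fun x => (PySem.List.index? liste x).getD 0) false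

-- ===== PORT B =====
-- one saturation round: nxt = set(comp); for x in comp: for v in (plus, minus): if v in S: nxt.add(v)
-- (comp is consumed only to build another set, so the result does not depend on set iteration order)
def fcStep (S : PySem.Set Int) (mx : Int) (comp : PySem.Set Int) : PySem.Set Int :=
  comp.foldl (fun nxt x =>
    [fcVoisinPlus mx x, fcVoisinMoins mx x].foldl
      (fun nxt v => if PySem.Set.contains S v then PySem.Set.add nxt v else nxt) nxt) comp


def filter_circulaire_alt (liste : List Int) (A : Int) (numPan : Int) : List Int :=
  let S := PySem.Set.ofList liste
  let mx := numPan - 1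
  let comp0 := PySem.Set.inter (PySem.Set.ofList [A]) S
  let comp := (List.range S.length).foldl (fun comp _ => fcStep S mx comp) comp0
  PySem.List.sorted comp (fun x => (PySem.List.index? liste x).getD 0) false

-- ===== PRECONDITION & SPEC =====
def Spec_filter_circulaire (liste : List Int) (A : Int) (numPan : Int) (out : List Int) : Prop := out = filter_circulaire_alt liste A numPan
instance (liste : List Int) (A : Int) (numPan : Int) (out : List Int) : Decidable (Spec_filter_circulaire liste A numPan out) := by unfold Spec_filter_circulaire; infer_instance

-- ===== CLAIM (what is proved, stated in full; the proofs are below) =====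
def Claim_equal_filter_circulaire : Prop := ∀ (liste : List Int) (A : Int) (numPan : Int), Dom_filter_circulaire liste A numPan → Spec_filter_circulaire liste A numPan (filter_circulaire liste A numPan)

-- ===== LEMMAS AND PROOFS =====

-- the connected component A computes: everything reachable from A by in-set circular ±1 steps
inductive fcReach (S : List Int) (mx A : Int) : Int → Prop
  | base : A ∈ S → fcReach S mx A A
  | plus {c : Int} : fcReach S mx A c → fcVoisinPlus mx c ∈ S → fcReach S mx A (fcVoisinPlus mx c)
  | minus {c : Int} : fcReach S mx A c → fcVoisinMoins mx c ∈ S → fcReach S mx A (fcVoisinMoins mx c)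

theorem fcLoop_supset_visited (S : PySem.Set Int) (mx : Int) (stack : List Int)
    (visited : PySem.Set Int) : ∀ x ∈ visited, x ∈ fcLoop S mx stack visited := by
  induction stack, visited using fcLoop.induct S mx with
  | case1 visited => intro x hx; rw [fcLoop]; exact hx
  | case2 visited c rest h ih =>
      intro x hx
      rw [fcLoop, dif_pos h]
      exact ih x ((PySem.Set.mem_add _ _ _).2 (Or.inl hx))
  | case3 visited c rest h ih =>
      intro x hx
      rw [fcLoop, dif_neg h]
      exact ih x hx

theorem fcCond_iff (S visited : PySem.Set Int) (c : Int) :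
    (PySem.Set.contains S c && !(PySem.Set.contains visited c)) = true ↔ c ∈ S ∧ c ∉ visited := by
  simp [Bool.and_eq_true, Bool.not_eq_true', PySem.Set.contains_eq_listContains,
    List.contains_eq_mem]

theorem fcLoop_supset_stack (S : PySem.Set Int) (mx : Int) (stack : List Int)
    (visited : PySem.Set Int) : ∀ x ∈ stack, x ∈ S → x ∈ fcLoop S mx stack visited := by
  induction stack, visited using fcLoop.induct S mx with
  | case1 visited => intro x hx; simp at hx
  | case2 visited c rest h ih =>
      intro x hx hxS
      rw [fcLoop, dif_pos h]
      rcases List.mem_cons.1 hx with rfl | hx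
      · exact fcLoop_supset_visited _ _ _ _ x ((PySem.Set.mem_add _ _ _).2 (Or.inr rfl))
      · exact ih x (by simp [hx]) hxS
  | case3 visited c rest h ih =>
      intro x hx hxS
      rw [fcLoop, dif_neg h]
      rcases List.mem_cons.1 hx with rfl | hx
      · have hmem : x ∈ visited := by
          by_contra hnv
          exact ((not_iff_not.2 (fcCond_iff S visited x)).1 h) ⟨hxS, hnv⟩
        exact fcLoop_supset_visited _ _ _ _ x hmem
      · exact ih x hx hxS

theorem fcLoop_sound (S : PySem.Set Int) (mx : Int) (stack : List Int) (visited : PySem.Set Int)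
    (A : Int)
    (hv : ∀ x ∈ visited, fcReach S mx A x)
    (hs : ∀ x ∈ stack, x ∈ S → fcReach S mx A x) :
    ∀ x ∈ fcLoop S mx stack visited, fcReach S mx A x := by
  induction stack, visited using fcLoop.induct S mx with
  | case1 visited => intro x hx; rw [fcLoop] at hx; exact hv x hx
  | case2 visited c rest h ih =>
      rw [fcLoop, dif_pos h]
      have hc := (fcCond_iff S visited c).1 h
      have hcr : fcReach S mx A c := hs c (by simp) hc.1
      apply ih
      · intro x hx
        rcases (PySem.Set.mem_add _ _ _).1 hx with hx | rfl
        · exact hv x hx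
        · exact hcr
      · intro x hx hxS
        simp only [List.mem_append] at hx
        rcases hx with (hx | hx) | hx
        · split_ifs at hx with hb
          · rw [List.mem_singleton] at hx; subst hx; exact fcReach.minus hcr hxS
          · simp at hx
        · split_ifs at hx with hb
          · rw [List.mem_singleton] at hx; subst hx; exact fcReach.plus hcr hxS
          · simp at hx
        · exact hs x (by simp [hx]) hxS
  | case3 visited c rest h ih =>
      rw [fcLoop, dif_neg h]
      exact ih hv (fun x hx hxS => hs x (by simp [hx]) hxS)

theorem fcLoop_nodup (S : PySem.Set Int) (mx : Int) (stack : List Int) (visited : PySem.Set Int)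
    (h : visited.Nodup) : (fcLoop S mx stack visited).Nodup := by
  induction stack, visited using fcLoop.induct S mx with
  | case1 visited => rw [fcLoop]; exact h
  | case2 visited c rest hc ih => rw [fcLoop, dif_pos hc]; exact ih (PySem.Set.nodup_add _ _ h)
  | case3 visited c rest hc ih => rw [fcLoop, dif_neg hc]; exact ih h

theorem fcLoop_closed (S : PySem.Set Int) (mx : Int) (stack : List Int) (visited : PySem.Set Int)
    (hinv : ∀ c ∈ visited,
      (fcVoisinPlus mx c ∈ S → fcVoisinPlus mx c ∈ visited ∨ fcVoisinPlus mx c ∈ stack) ∧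
      (fcVoisinMoins mx c ∈ S → fcVoisinMoins mx c ∈ visited ∨ fcVoisinMoins mx c ∈ stack)) :
    ∀ c ∈ fcLoop S mx stack visited,
      (fcVoisinPlus mx c ∈ S → fcVoisinPlus mx c ∈ fcLoop S mx stack visited) ∧
      (fcVoisinMoins mx c ∈ S → fcVoisinMoins mx c ∈ fcLoop S mx stack visited) := by
  induction stack, visited using fcLoop.induct S mx with
  | case1 visited =>
      intro c hc
      rw [fcLoop] at hc ⊢
      exact ⟨fun hS => ((hinv c hc).1 hS).elim id (by simp),
             fun hS => ((hinv c hc).2 hS).elim id (by simp)⟩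
  | case2 visited c0 rest h ih =>
      rw [fcLoop, dif_pos h]
      apply ih
      intro c' hc'
      rcases (PySem.Set.mem_add _ _ _).1 hc' with hc' | rfl
      · refine ⟨fun hS => ?_, fun hS => ?_⟩
        · rcases (hinv c' hc').1 hS with hv | hst
          · exact Or.inl ((PySem.Set.mem_add _ _ _).2 (Or.inl hv))
          · rcases List.mem_cons.1 hst with heq | hst
            · exact Or.inl ((PySem.Set.mem_add _ _ _).2 (Or.inr heq))
            · exact Or.inr (by simp [hst])
        · rcases (hinv c' hc').2 hS with hv | hst
          · exact Or.inl ((PySem.Set.mem_add _ _ _).2 (Or.inl hv))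
          · rcases List.mem_cons.1 hst with heq | hst
            · exact Or.inl ((PySem.Set.mem_add _ _ _).2 (Or.inr heq))
            · exact Or.inr (by simp [hst])
      · refine ⟨fun hS => Or.inr ?_, fun hS => Or.inr ?_⟩
        · have : PySem.Set.contains S (fcVoisinPlus mx c') = true := by
            simp [PySem.Set.contains_eq_listContains, List.contains_eq_mem, hS]
          simp only [this]
          simp
        · have : PySem.Set.contains S (fcVoisinMoins mx c') = true := by
            simp [PySem.Set.contains_eq_listContains, List.contains_eq_mem, hS]
          simp only [this]
          simp
  | case3 visited c0 rest h ih =>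
      rw [fcLoop, dif_neg h]
      have hc0 : c0 ∈ S → c0 ∈ visited := by
        intro hS; by_contra hnv
        exact ((not_iff_not.2 (fcCond_iff S visited c0)).1 h) ⟨hS, hnv⟩
      apply ih
      intro c' hc'
      refine ⟨fun hS => ?_, fun hS => ?_⟩
      · rcases (hinv c' hc').1 hS with hv | hst
        · exact Or.inl hv
        · rcases List.mem_cons.1 hst with heq | hst
          · exact Or.inl (heq ▸ hc0 (heq ▸ hS))
          · exact Or.inr hst
      · rcases (hinv c' hc').2 hS with hv | hst
        · exact Or.inl hv
        · rcases List.mem_cons.1 hst with heq | hst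
          · exact Or.inl (heq ▸ hc0 (heq ▸ hS))
          · exact Or.inr hst

theorem fcReach_mem {S : List Int} {mx A x : Int} (h : fcReach S mx A x) : x ∈ S := by
  induction h with
  | base h => exact h
  | plus _ h _ => exact h
  | minus _ h _ => exact h

theorem fcReach_A_mem {S : List Int} {mx A x : Int} (h : fcReach S mx A x) : A ∈ S := by
  induction h with
  | base h => exact h
  | plus _ _ ih => exact ih
  | minus _ _ ih => exact ih

theorem fcReach_subset_closed {S : List Int} {mx A : Int} {T : List Int}
    (hA : A ∈ S → A ∈ T)
    (hp : ∀ c ∈ T, fcVoisinPlus mx c ∈ S → fcVoisinPlus mx c ∈ T)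
    (hm : ∀ c ∈ T, fcVoisinMoins mx c ∈ S → fcVoisinMoins mx c ∈ T) :
    ∀ x, fcReach S mx A x → x ∈ T := by
  intro x h
  induction h with
  | base h => exact hA h
  | plus h1 h2 ih => exact hp _ ih h2
  | minus h1 h2 ih => exact hm _ ih h2

theorem mem_fcLoop_iff (S : PySem.Set Int) (mx A : Int) :
    ∀ x, x ∈ fcLoop S mx [A] PySem.Set.empty ↔ fcReach S mx A x := by
  intro x
  constructor
  · exact fun hx => fcLoop_sound S mx [A] PySem.Set.empty A (by simp [PySem.Set.empty])
      (by intro y hy hyS; rw [List.mem_singleton] at hy; subst hy; exact fcReach.base hyS) x hx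
  · intro hr
    refine fcReach_subset_closed (fun hA => fcLoop_supset_stack S mx [A] _ A (by simp) hA)
      (fun c hc => (fcLoop_closed S mx [A] _ (by simp [PySem.Set.empty]) c hc).1)
      (fun c hc => (fcLoop_closed S mx [A] _ (by simp [PySem.Set.empty]) c hc).2) x hr

-- inner body of fcStep's fold, for the proofs
def fcF (S : PySem.Set Int) (mx : Int) (nxt : PySem.Set Int) (x : Int) : PySem.Set Int :=
  [fcVoisinPlus mx x, fcVoisinMoins mx x].foldl
    (fun nxt v => if PySem.Set.contains S v then PySem.Set.add nxt v else nxt) nxt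

theorem fcStep_eq (S : PySem.Set Int) (mx : Int) (comp : PySem.Set Int) :
    fcStep S mx comp = comp.foldl (fcF S mx) comp := rfl

theorem mem_fcF (S : PySem.Set Int) (mx : Int) (nxt : PySem.Set Int) (x y : Int) :
    y ∈ fcF S mx nxt x ↔ y ∈ nxt ∨ (y = fcVoisinPlus mx x ∧ y ∈ S) ∨ (y = fcVoisinMoins mx x ∧ y ∈ S) := by
  simp only [fcF, List.foldl_cons, List.foldl_nil, PySem.Set.add_eq_ite,
    PySem.Set.contains_eq_listContains, List.contains_eq_mem]
  split_ifs <;> simp_all <;> aesop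

theorem set_add_append {α : Type} [BEq α] [LawfulBEq α] (s : PySem.Set α) (x : α) :
    ∃ t, PySem.Set.add s x = s ++ t := by
  rw [PySem.Set.add_eq_ite]; split_ifs
  · exact ⟨[], by simp⟩
  · exact ⟨[x], rfl⟩

theorem fcF_append (S : PySem.Set Int) (mx : Int) (nxt : PySem.Set Int) (x : Int) :
    ∃ t, fcF S mx nxt x = nxt ++ t := by
  simp only [fcF, List.foldl_cons, List.foldl_nil]
  set mid := (if PySem.Set.contains S (fcVoisinPlus mx x) = true then PySem.Set.add nxt (fcVoisinPlus mx x) else nxt) with hmid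
  have hmid' : ∃ t, mid = nxt ++ t := by
    rw [hmid]; split_ifs
    · exact set_add_append nxt (fcVoisinPlus mx x)
    · exact ⟨[], by simp⟩
  obtain ⟨t2, h2⟩ := hmid'
  obtain ⟨t3, h3⟩ := set_add_append mid (fcVoisinMoins mx x)
  split_ifs
  · exact ⟨t2 ++ t3, by rw [h3, h2, List.append_assoc]⟩
  · exact ⟨t2, h2⟩

theorem fcF_nodup (S : PySem.Set Int) (mx : Int) (nxt : PySem.Set Int) (x : Int)
    (h : nxt.Nodup) : (fcF S mx nxt x).Nodup := by
  simp only [fcF, List.foldl_cons, List.foldl_nil]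
  split_ifs <;> first
    | exact PySem.Set.nodup_add _ _ (PySem.Set.nodup_add _ _ h)
    | exact PySem.Set.nodup_add _ _ h
    | exact h

theorem foldl_fcF_append (S : PySem.Set Int) (mx : Int) (l : List Int) :
    ∀ acc : PySem.Set Int, ∃ t, l.foldl (fcF S mx) acc = acc ++ t := by
  induction l with
  | nil => exact fun acc => ⟨[], by simp⟩
  | cons x l ih =>
      intro acc
      obtain ⟨t1, ht1⟩ := fcF_append S mx acc x
      obtain ⟨t2, ht2⟩ := ih (fcF S mx acc x)
      rw [ht1] at ht2
      exact ⟨t1 ++ t2, by rw [List.foldl_cons, ht1, ht2, List.append_assoc]⟩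

theorem mem_foldl_fcF_sound (S : PySem.Set Int) (mx : Int) (l : List Int) :
    ∀ (acc : PySem.Set Int) (y : Int), y ∈ l.foldl (fcF S mx) acc →
      y ∈ acc ∨ ∃ x ∈ l, (y = fcVoisinPlus mx x ∨ y = fcVoisinMoins mx x) ∧ y ∈ S := by
  induction l with
  | nil => intro acc y h; exact Or.inl h
  | cons x l ih =>
      intro acc y h
      rw [List.foldl_cons] at h
      rcases ih _ y h with h' | ⟨x', hx', h'⟩
      · rcases (mem_fcF S mx acc x y).1 h' with h'' | h'' | h''
        · exact Or.inl h''
        · exact Or.inr ⟨x, by simp, Or.inl h''.1, h''.2⟩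
        · exact Or.inr ⟨x, by simp, Or.inr h''.1, h''.2⟩
      · exact Or.inr ⟨x', by simp [hx'], h'⟩

theorem mem_foldl_fcF_mono (S : PySem.Set Int) (mx : Int) (l : List Int)
    (acc : PySem.Set Int) (y : Int) (h : y ∈ acc) : y ∈ l.foldl (fcF S mx) acc := by
  obtain ⟨t, ht⟩ := foldl_fcF_append S mx l acc
  rw [ht]; exact List.mem_append_left _ h

theorem mem_foldl_fcF_complete (S : PySem.Set Int) (mx : Int) (l : List Int) :
    ∀ (acc : PySem.Set Int) (x : Int), x ∈ l →
      (fcVoisinPlus mx x ∈ S → fcVoisinPlus mx x ∈ l.foldl (fcF S mx) acc) ∧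
      (fcVoisinMoins mx x ∈ S → fcVoisinMoins mx x ∈ l.foldl (fcF S mx) acc) := by
  induction l with
  | nil => intro acc x h; simp at h
  | cons a l ih =>
      intro acc x h
      rcases List.mem_cons.1 h with rfl | h
      · constructor <;> intro hS <;> rw [List.foldl_cons] <;>
          exact mem_foldl_fcF_mono S mx l _ _ ((mem_fcF S mx acc x _).2 (by tauto))
      · rw [List.foldl_cons]; exact ih _ x h

theorem foldl_fcF_nodup (S : PySem.Set Int) (mx : Int) (l : List Int) :
    ∀ acc : PySem.Set Int, acc.Nodup → (l.foldl (fcF S mx) acc).Nodup := by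
  induction l with
  | nil => exact fun acc h => h
  | cons x l ih => intro acc h; rw [List.foldl_cons]; exact ih _ (fcF_nodup S mx acc x h)

theorem fcStep_append (S : PySem.Set Int) (mx : Int) (comp : PySem.Set Int) :
    ∃ t, fcStep S mx comp = comp ++ t := by
  rw [fcStep_eq]; exact foldl_fcF_append S mx comp comp

theorem fcStep_mono (S : PySem.Set Int) (mx : Int) (comp : PySem.Set Int) (y : Int)
    (h : y ∈ comp) : y ∈ fcStep S mx comp := by
  obtain ⟨t, ht⟩ := fcStep_append S mx comp
  rw [ht]; exact List.mem_append_left _ h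

theorem fcStep_sound (S : PySem.Set Int) (mx : Int) (comp : PySem.Set Int) (y : Int)
    (h : y ∈ fcStep S mx comp) :
    y ∈ comp ∨ ∃ x ∈ comp, (y = fcVoisinPlus mx x ∨ y = fcVoisinMoins mx x) ∧ y ∈ S := by
  rw [fcStep_eq] at h
  exact mem_foldl_fcF_sound S mx comp comp y h

theorem fcStep_closed (S : PySem.Set Int) (mx : Int) (comp : PySem.Set Int) (x : Int)
    (h : x ∈ comp) :
    (fcVoisinPlus mx x ∈ S → fcVoisinPlus mx x ∈ fcStep S mx comp) ∧
    (fcVoisinMoins mx x ∈ S → fcVoisinMoins mx x ∈ fcStep S mx comp) := by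
  rw [fcStep_eq]
  exact mem_foldl_fcF_complete S mx comp comp x h

theorem fcStep_nodup (S : PySem.Set Int) (mx : Int) (comp : PySem.Set Int)
    (h : comp.Nodup) : (fcStep S mx comp).Nodup := by
  rw [fcStep_eq]; exact foldl_fcF_nodup S mx comp comp h

-- the k-th saturation round of B's loop
def fcIter (S : PySem.Set Int) (mx : Int) (c0 : PySem.Set Int) (n : Nat) : PySem.Set Int :=
  (List.range n).foldl (fun comp _ => fcStep S mx comp) c0

theorem fcIter_succ (S : PySem.Set Int) (mx : Int) (c0 : PySem.Set Int) (n : Nat) :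
    fcIter S mx c0 (n + 1) = fcStep S mx (fcIter S mx c0 n) := by
  simp [fcIter, List.range_succ]

theorem fcIter_nodup (S : PySem.Set Int) (mx : Int) (c0 : PySem.Set Int) (h : c0.Nodup)
    (n : Nat) : (fcIter S mx c0 n).Nodup := by
  induction n with
  | zero => exact h
  | succ n ih => rw [fcIter_succ]; exact fcStep_nodup S mx _ ih

theorem fcIter_subset_S (S : PySem.Set Int) (mx : Int) (c0 : PySem.Set Int)
    (h : ∀ y ∈ c0, y ∈ S) (n : Nat) : ∀ y ∈ fcIter S mx c0 n, y ∈ S := by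
  induction n with
  | zero => exact h
  | succ n ih =>
      intro y hy
      rw [fcIter_succ] at hy
      rcases fcStep_sound S mx _ y hy with hy | ⟨x, _, _, hyS⟩
      · exact ih y hy
      · exact hyS

theorem fcIter_mono (S : PySem.Set Int) (mx : Int) (c0 : PySem.Set Int) (y : Int)
    (h : y ∈ c0) (n : Nat) : y ∈ fcIter S mx c0 n := by
  induction n with
  | zero => exact h
  | succ n ih => rw [fcIter_succ]; exact fcStep_mono S mx _ y ih

theorem fcIter_reach (S : PySem.Set Int) (mx A : Int) (c0 : PySem.Set Int)
    (h : ∀ y ∈ c0, fcReach S mx A y) (n : Nat) : ∀ y ∈ fcIter S mx c0 n, fcReach S mx A y := by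
  induction n with
  | zero => exact h
  | succ n ih =>
      intro y hy
      rw [fcIter_succ] at hy
      rcases fcStep_sound S mx _ y hy with hy | ⟨x, hx, hyx, hyS⟩
      · exact ih y hy
      · rcases hyx with rfl | rfl
        · exact fcReach.plus (ih x hx) hyS
        · exact fcReach.minus (ih x hx) hyS

theorem fcIter_len_ge (S : PySem.Set Int) (mx : Int) (c0 : PySem.Set Int) (n : Nat)
    (h : ∀ k < n, fcStep S mx (fcIter S mx c0 k) ≠ fcIter S mx c0 k) :
    c0.length + n ≤ (fcIter S mx c0 n).length := by
  induction n with
  | zero => simp [fcIter]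
  | succ n ih =>
      have hn := ih (fun k hk => h k (Nat.lt_succ_of_lt hk))
      obtain ⟨t, ht⟩ := fcStep_append S mx (fcIter S mx c0 n)
      have hne := h n (Nat.lt_succ_self n)
      have htne : t ≠ [] := by
        intro hteq; rw [hteq, List.append_nil] at ht; exact hne ht
      rw [fcIter_succ, ht, List.length_append]
      have := List.length_pos_of_ne_nil htne
      omega

theorem fcIter_stab (S : PySem.Set Int) (mx : Int) (c0 : PySem.Set Int) (k : Nat)
    (h : fcStep S mx (fcIter S mx c0 k) = fcIter S mx c0 k) :
    ∀ m, k ≤ m → fcIter S mx c0 m = fcIter S mx c0 k := by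
  intro m hm
  induction m with
  | zero => cases Nat.le_zero.1 hm; rfl
  | succ m ih =>
      rcases Nat.lt_or_ge k (m+1) with hlt | hge
      · have hkm : k ≤ m := Nat.lt_succ_iff.1 hlt
        rw [fcIter_succ, ih hkm, h]
      · have : k = m + 1 := Nat.le_antisymm hm hge
        rw [this]

theorem nodup_subset_length {l S : List Int} (hnd : l.Nodup) (hsub : ∀ x ∈ l, x ∈ S) :
    l.length ≤ S.length := by
  calc l.length = l.toFinset.card := (List.toFinset_card_of_nodup hnd).symm
    _ ≤ S.toFinset.card := Finset.card_le_card (fun x hx => by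
        rw [List.mem_toFinset] at hx ⊢; exact hsub x hx)
    _ ≤ S.length := S.toFinset_card_le

theorem fcIter_fix (S : PySem.Set Int) (mx : Int) (c0 : PySem.Set Int)
    (hnd : c0.Nodup) (hsub : ∀ y ∈ c0, y ∈ S) (hne : c0 ≠ []) :
    fcStep S mx (fcIter S mx c0 S.length) = fcIter S mx c0 S.length := by
  by_cases hfix : ∃ k < S.length, fcStep S mx (fcIter S mx c0 k) = fcIter S mx c0 k
  · obtain ⟨k, hk, hfk⟩ := hfix
    have h1 := fcIter_stab S mx c0 k hfk S.length (Nat.le_of_lt hk)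
    rw [h1, hfk]
  · push Not at hfix
    exfalso
    have hge := fcIter_len_ge S mx c0 S.length hfix
    have hle := nodup_subset_length (fcIter_nodup S mx c0 hnd S.length)
      (fcIter_subset_S S mx c0 hsub S.length)
    have hpos : 0 < c0.length := List.length_pos_of_ne_nil hne
    omega

theorem mem_fcAlt_iff (S : PySem.Set Int) (mx A : Int) (hS : S.Nodup) :
    ∀ x, x ∈ fcIter S mx (PySem.Set.inter (PySem.Set.ofList [A]) S) S.length ↔ fcReach S mx A x := by
  have hc0 : ∀ y, y ∈ PySem.Set.inter (PySem.Set.ofList [A]) S ↔ y = A ∧ y ∈ S := by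
    intro y
    rw [PySem.Set.mem_inter]
    simp [PySem.Set.ofList]
  intro x
  constructor
  · exact fcIter_reach S mx A _ (fun y hy => by
      obtain ⟨rfl, hyS⟩ := (hc0 y).1 hy; exact fcReach.base hyS) S.length x
  · intro hr
    have hA : A ∈ S := fcReach_A_mem hr
    have hAc0 : A ∈ PySem.Set.inter (PySem.Set.ofList [A]) S := (hc0 A).2 ⟨rfl, hA⟩
    have hnd : (PySem.Set.inter (PySem.Set.ofList [A]) S).Nodup :=
      PySem.Set.nodup_inter _ _ (PySem.Set.nodup_ofList _)
    have hsub : ∀ y ∈ PySem.Set.inter (PySem.Set.ofList [A]) S, y ∈ S :=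
      fun y hy => ((hc0 y).1 hy).2
    have hfix := fcIter_fix S mx _ hnd hsub (List.ne_nil_of_mem hAc0)
    refine fcReach_subset_closed (fun _ => fcIter_mono S mx _ A hAc0 S.length)
      (fun c hc hcS => ?_) (fun c hc hcS => ?_) x hr
    · have := (fcStep_closed S mx _ c hc).1 hcS
      rwa [hfix] at this
    · have := (fcStep_closed S mx _ c hc).2 hcS
      rwa [hfix] at this

theorem fcKey_inj (liste : List Int) {x y : Int} (hx : x ∈ liste) (hy : y ∈ liste)
    (h : (PySem.List.index? liste x).getD 0 = (PySem.List.index? liste y).getD 0) : x = y := by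
  obtain ⟨kx, hkx⟩ := Option.isSome_iff_exists.1 ((PySem.List.index?_isSome_iff liste x).2 hx)
  obtain ⟨ky, hky⟩ := Option.isSome_iff_exists.1 ((PySem.List.index?_isSome_iff liste y).2 hy)
  obtain ⟨hlx, hgx, -⟩ := PySem.List.getElem_of_index?_eq_some hkx
  obtain ⟨hly, hgy, -⟩ := PySem.List.getElem_of_index?_eq_some hky
  rw [hkx, hky] at h
  simp at h
  subst h
  rw [← hgx, ← hgy]

theorem fc_out_eq (liste : List Int) (A : Int) (numPan : Int) :
    filter_circulaire liste A numPan = filter_circulaire_alt liste A numPan := by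
  unfold filter_circulaire filter_circulaire_alt
  have hSnd : (PySem.Set.ofList liste).Nodup := PySem.Set.nodup_ofList _
  have hiffA := mem_fcLoop_iff (PySem.Set.ofList liste) (numPan - 1) A
  have hiffB := mem_fcAlt_iff (PySem.Set.ofList liste) (numPan - 1) A hSnd
  set S := PySem.Set.ofList liste with hs
  set mx := numPan - 1
  set key : Int → Nat := fun x => (PySem.List.index? liste x).getD 0 with hkey
  set RA := fcLoop S mx [A] PySem.Set.empty with hra
  set RB := (List.range S.length).foldl (fun comp _ => fcStep S mx comp)
      (PySem.Set.inter (PySem.Set.ofList [A]) S) with hrb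
  have hRBiter : RB = fcIter S mx (PySem.Set.inter (PySem.Set.ofList [A]) S) S.length := rfl
  have hiff : ∀ x, x ∈ RA ↔ x ∈ RB := fun x => by
    rw [hRBiter]; exact (hiffA x).trans (hiffB x).symm
  have ndA : RA.Nodup := fcLoop_nodup S mx [A] PySem.Set.empty List.nodup_nil
  have ndB : RB.Nodup := by
    rw [hRBiter]
    exact fcIter_nodup S mx _ (PySem.Set.nodup_inter _ _ (PySem.Set.nodup_ofList _)) _
  have hperm : RA.Perm RB := (List.perm_ext_iff_of_nodup ndA ndB).2 hiff
  have hmem : ∀ x ∈ RA, x ∈ liste := fun x hx => by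
    have := fcReach_mem ((hiffA x).1 hx)
    rwa [PySem.Set.mem_ofList] at this
  have hpw := PySem.List.sorted_pairwise RA key
  have hnds : (PySem.List.sorted RA key false).Nodup :=
    ((PySem.List.sorted_perm RA key false).symm).nodup ndA
  have hplt : (PySem.List.sorted RA key false).Pairwise (fun a b => key a < key b) := by
    have hand := hpw.and hnds
    refine hand.imp_of_mem ?_
    intro a b ha hb hab
    have ha' : a ∈ RA := (PySem.List.mem_sorted RA key false a).1 ha
    have hb' : b ∈ RA := (PySem.List.mem_sorted RA key false b).1 hb
    exact lt_of_le_of_ne hab.1 (fun hk => hab.2 (fcKey_inj liste (hmem a ha') (hmem b hb') hk))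
  have hperm2 : (PySem.List.sorted RA key false).Perm RB :=
    (PySem.List.sorted_perm RA key false).trans hperm
  exact (PySem.List.sorted_eq_of_perm_of_pairwise_lt _ _ _ hperm2 hplt).symm

-- ===== VERDICT (by name: the statement is the Claim_ definition above) =====
theorem filter_circulaire_spec : Claim_equal_filter_circulaire := by
  intro liste A numPan _
  unfold Spec_filter_circulaire
  exact fc_out_eq liste A numPan
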